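-- pv_equiv track=rewrite | github.com/reccli/reccli | packages/reccli/project/devproject.py | _extract_document_code_references
-- ===== SOURCE A (Python) =====
-- from typing import Any, Dict, List, Optional, Tuple
--
-- def _extract_document_code_references(text: str, known_paths: List[str]) -> List[str]:
--     references: List[str] = []
--     if not text:
--         return references
--     for candidate in known_paths:
--         if candidate in text:
--             references.append(candidate)
--     return references
-- ===== SOURCE B (Python) =====
-- def _extract_document_code_references(text, known_paths):
--     # Length-indexed n-gram index: for each distinct candidate length L, build the
--     # set of all length-L substrings of text once; a candidate matches iff it is
--     # in the window set for its length.
--     if not text: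
--         return []
--     grams = {}
--     for L in {len(p) for p in known_paths}:
--         grams[L] = {text[i:i + L] for i in range(len(text) - L + 1)}
--     return [p for p in known_paths if p in grams[len(p)]]
-- ===== Notes on version B (the rewrite author's own statement) =====
-- stated objective: faster
-- what changed: B replaces A's per-candidate 'candidate in text' scans by a length-indexed n-gram index: it builds, once per distinct candidate length L, the set of all length-L substrings of text, then filters known_paths by set membership; correctness rests on 'c in text' iff c equals some length-len(c) window of text.
import Mathlib
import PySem

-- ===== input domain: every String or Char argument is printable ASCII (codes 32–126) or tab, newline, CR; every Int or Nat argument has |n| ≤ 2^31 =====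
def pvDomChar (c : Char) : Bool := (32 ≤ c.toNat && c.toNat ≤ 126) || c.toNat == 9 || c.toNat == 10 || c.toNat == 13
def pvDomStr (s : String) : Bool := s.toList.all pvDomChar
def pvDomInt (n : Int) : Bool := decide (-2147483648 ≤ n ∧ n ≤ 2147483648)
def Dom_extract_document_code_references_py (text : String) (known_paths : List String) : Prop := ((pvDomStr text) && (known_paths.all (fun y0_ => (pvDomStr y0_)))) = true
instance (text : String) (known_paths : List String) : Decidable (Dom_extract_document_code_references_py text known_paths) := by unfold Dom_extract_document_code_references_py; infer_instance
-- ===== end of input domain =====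

-- B replaces A's per-candidate 'candidate in text' scans by a length-indexed n-gram index of the
-- text, filtering known_paths by set membership (objective: faster — one text scan per distinct length).

-- ===== PORT A =====
-- if not text: return []; for candidate in known_paths: if candidate in text: references.append(candidate)
def extract_document_code_references_py (text : String) (known_paths : List String) : List String :=
  if text = "" then []
  else known_paths.foldl (fun references candidate =>
    if PySem.Str.isIn candidate text then references ++ [candidate] else references) []

-- ===== PORT B =====
-- if not text: return []
-- grams = {}; for L in {len(p) for p in known_paths}: grams[L] = {text[i:i+L] for i in range(len(text)-L+1)}
-- return [p for p in known_paths if p in grams[len(p)]]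
-- grams[len(p)] is looked up with getD: len(p) is always a key of grams, so the default is never used.
-- The dict is built by iterating the set of lengths; the result only looks the dict up, so it is order-independent.
def extract_document_code_references_py_alt (text : String) (known_paths : List String) : List String :=
  if text = "" then []
  else
    let lengths : PySem.Set Int := PySem.Set.ofList (known_paths.map (fun p => ((PySem.Str.len p : Int))))
    let grams : PySem.Dict Int (PySem.Set String) :=
      lengths.foldl (fun d L =>
        PySem.Dict.insert d L
          ((PySem.List.pyRange 0 ((PySem.Str.len text : Int) - L + 1) 1).foldl
            (fun s i => PySem.Set.add s (PySem.Str.slice text (some i) (some (i + L))))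
            PySem.Set.empty)) PySem.Dict.empty
    known_paths.filter (fun p =>
      PySem.Set.contains (PySem.Dict.getD grams ((PySem.Str.len p : Int)) PySem.Set.empty) p)

-- ===== PRECONDITION & SPEC =====
def Spec_extract_document_code_references_py (text : String) (known_paths : List String) (out : List String) : Prop := out = extract_document_code_references_py_alt text known_paths
instance (text : String) (known_paths : List String) (out : List String) : Decidable (Spec_extract_document_code_references_py text known_paths out) := by unfold Spec_extract_document_code_references_py; infer_instance

-- ===== CLAIM (what is proved, stated in full; the proofs are below) =====
def Claim_equal_extract_document_code_references_py : Prop := ∀ (text : String) (known_paths : List String), Dom_extract_document_code_references_py text known_paths → Spec_extract_document_code_references_py text known_paths (extract_document_code_references_py text known_paths)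

-- ===== LEMMAS AND PROOFS =====

-- folding key-determined inserts over keys not containing k leaves get? k unchanged
theorem pv_get?_foldl_insert_not_mem {ν : Type} (f : Int → ν) (ks : List Int)
    (d : PySem.Dict Int ν) (k : Int) (hk : k ∉ ks) :
    PySem.Dict.get? (ks.foldl (fun d L => PySem.Dict.insert d L (f L)) d) k = PySem.Dict.get? d k := by
  induction ks generalizing d with
  | nil => rfl
  | cons x xs ih =>
    simp only [List.mem_cons, not_or] at hk
    rw [List.foldl_cons, ih _ hk.2, PySem.Dict.get?_insert_of_ne _ _ hk.1]

-- folding key-determined inserts: a key in the list maps to its value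
theorem pv_get?_foldl_insert_mem {ν : Type} (f : Int → ν) (ks : List Int)
    (d : PySem.Dict Int ν) (k : Int) (hk : k ∈ ks) :
    PySem.Dict.get? (ks.foldl (fun d L => PySem.Dict.insert d L (f L)) d) k = some (f k) := by
  induction ks generalizing d with
  | nil => exact absurd hk (List.not_mem_nil)
  | cons x xs ih =>
    rw [List.foldl_cons]
    by_cases hx : k ∈ xs
    · exact ih _ hx
    · have hkx : k = x := by rcases List.mem_cons.mp hk with h | h; exacts [h, absurd h hx]
      subst hkx
      rw [pv_get?_foldl_insert_not_mem _ _ _ _ hx, PySem.Dict.get?_insert_self]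

-- a candidate of length L occurs as a length-L window of text iff it is a substring (text nonempty)
theorem pv_window_iff (text : String) (p : String) (ht : text.toList ≠ []) :
    (∃ i ∈ PySem.List.pyRange 0 ((PySem.Str.len text : Int) - (PySem.Str.len p : Int) + 1) 1,
        PySem.Str.slice text (some i) (some (i + (PySem.Str.len p : Int))) = p) ↔
      PySem.Str.isIn p text = true := by
  have hlt : PySem.Str.len text = text.toList.length := by simp [PySem.Str.len]
  have hlp : PySem.Str.len p = p.toList.length := by simp [PySem.Str.len]
  rw [PySem.Str.isIn_iff_infix, ← PySem.Chars.isIn_iff_infix,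
      ← PySem.Chars.exists_prefix_drop_iff_isIn]
  constructor
  · rintro ⟨i, hi, hs⟩
    rw [PySem.List.mem_pyRange_one] at hi
    refine ⟨i.toNat, ?_⟩
    have h0 : (0 : Int) ≤ i := hi.1
    have hL : (0 : Int) ≤ i + (PySem.Str.len p : Int) := by omega
    have hsl := congrArg String.toList hs
    rw [PySem.Str.toList_slice, PySem.Chars.slice_eq_listSlice,
        PySem.List.slice_toNat _ h0 hL] at hsl
    have htn : (i + (PySem.Str.len p : Int)).toNat - i.toNat = p.toList.length := by omega
    rw [htn] at hsl
    rw [List.prefix_iff_eq_take]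
    exact hsl.symm
  · rintro ⟨j, hj⟩
    have hjlen : p.toList.length ≤ text.toList.length - j := by
      have := hj.length_le
      rw [List.length_drop] at this
      omega
    have hjle : p.toList = [] ∨ j < text.toList.length := by
      by_cases hp0 : p.toList = []
      · exact Or.inl hp0
      · have : 0 < p.toList.length := List.length_pos_iff.mpr hp0
        exact Or.inr (by omega)
    have hn0 : 0 < text.toList.length := List.length_pos_iff.mpr ht
    -- choose the window start: j itself, or 0 when p is empty and j is past the end
    obtain ⟨j', hj'lt, hj'⟩ : ∃ j' : Nat, (j' : Int) < (PySem.Str.len text : Int) - (PySem.Str.len p : Int) + 1 ∧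
        p.toList <+: text.toList.drop j' := by
      rcases hjle with hp0 | hlt2
      · refine ⟨0, ?_, by simp [hp0]⟩
        rw [hlt, hlp, hp0]
        simp only [List.length_nil, Nat.cast_zero]
        omega
      · exact ⟨j, by rw [hlt, hlp]; omega, hj⟩
    refine ⟨(j' : Int), ?_, ?_⟩
    · rw [PySem.List.mem_pyRange_one]
      exact ⟨Int.natCast_nonneg j', hj'lt⟩
    · have h0 : (0 : Int) ≤ (j' : Int) := Int.natCast_nonneg j'
      have hL : (0 : Int) ≤ (j' : Int) + (PySem.Str.len p : Int) := by omega
      apply String.toList_inj.mp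
      rw [PySem.Str.toList_slice, PySem.Chars.slice_eq_listSlice,
          PySem.List.slice_toNat _ h0 hL]
      have htn : ((j' : Int) + (PySem.Str.len p : Int)).toNat - (j' : Int).toNat = p.toList.length := by
        rw [hlp]; omega
      rw [htn]
      exact (List.prefix_iff_eq_take.mp hj').symm

-- ===== VERDICT (by name: the statement is the Claim_ definition above) =====
theorem extract_document_code_references_py_spec : Claim_equal_extract_document_code_references_py := by
  intro text known_paths _
  unfold Spec_extract_document_code_references_py
  unfold extract_document_code_references_py extract_document_code_references_py_alt
  by_cases ht : text = ""
  · simp [ht]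
  · simp only [ht, reduceIte]
    have hA := PySem.List.foldl_append_if (fun c => PySem.Str.isIn c text) id known_paths []
    simp only [id_eq, List.map_id, List.nil_append] at hA
    rw [hA]
    refine List.filter_congr (fun p hp => ?_)
    have htl : text.toList ≠ [] := by
      intro h
      have h2 := congrArg String.ofList h
      simp at h2
      exact ht h2
    -- the key len(p) is in the folded key list, so the dict lookup returns its window set
    have hk : ((PySem.Str.len p : Int)) ∈ PySem.Set.ofList (known_paths.map (fun q => ((PySem.Str.len q : Int)))) := by
      rw [PySem.Set.mem_ofList]
      exact List.mem_map.mpr ⟨p, hp, rfl⟩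
    have hget := pv_get?_foldl_insert_mem
      (fun L => (PySem.List.pyRange 0 ((PySem.Str.len text : Int) - L + 1) 1).foldl
        (fun s i => PySem.Set.add s (PySem.Str.slice text (some i) (some (i + L))))
        PySem.Set.empty)
      (PySem.Set.ofList (known_paths.map (fun q => ((PySem.Str.len q : Int)))))
      PySem.Dict.empty ((PySem.Str.len p : Int)) hk
    rw [Bool.eq_iff_iff, PySem.Set.contains_iff, PySem.Dict.getD, hget, Option.getD_some,
        PySem.Set.mem_foldl_add]
    simp only [PySem.Set.empty, List.not_mem_nil, false_or]
    rw [← pv_window_iff text p htl]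
    constructor
    · rintro ⟨i, hi, hs⟩
      exact ⟨i, hi, hs.symm⟩
    · rintro ⟨i, hi, hs⟩
      exact ⟨i, hi, hs.symm⟩
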